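-- pv_equiv track=rewrite | github.com/CMarchell/autoclips | src/media/footage.py | _select_best_video_file
-- ===== SOURCE A (Python) =====
-- from typing import Optional
--
-- def _select_best_video_file(video_files: list[dict]) -> Optional[dict]:
--     """Select the best video file for our needs (portrait, HD)."""
--     # Prefer portrait orientation, HD quality
--     portrait_files = [
--         f for f in video_files if f.get("height", 0) > f.get("width", 0)
--     ]
--
--     if not portrait_files:
--         # Fall back to any file
--         portrait_files = video_files
--
--     if not portrait_files:
--         return None
--
--     # Sort by height (quality) descending, but cap at 1920
--     sorted_files = sorted(
--         portrait_files,
--         key=lambda f: min(f.get("height", 0), 1920),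
--         reverse=True,
--     )
--
--     return sorted_files[0]
-- ===== SOURCE B (Python) =====
-- from typing import Optional
--
-- def _select_best_video_file(video_files: list[dict]) -> Optional[dict]:
--     """Select the best video file (portrait, HD) in one keyed max pass."""
--     if not video_files:
--         return None
--     return max(
--         video_files,
--         key=lambda f: (
--             f.get("height", 0) > f.get("width", 0),
--             min(f.get("height", 0), 1920),
--         ),
--     )
-- ===== Notes on version B (the rewrite author's own statement) =====
-- stated objective: simpler
-- what changed: Replaces A's portrait filter + fallback branch + stable reverse sort + head with a single keyed max pass over the composite key (is-portrait, capped height), relying on max returning the first maximal element to match A's stable-sort tie-break.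
import Mathlib
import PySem

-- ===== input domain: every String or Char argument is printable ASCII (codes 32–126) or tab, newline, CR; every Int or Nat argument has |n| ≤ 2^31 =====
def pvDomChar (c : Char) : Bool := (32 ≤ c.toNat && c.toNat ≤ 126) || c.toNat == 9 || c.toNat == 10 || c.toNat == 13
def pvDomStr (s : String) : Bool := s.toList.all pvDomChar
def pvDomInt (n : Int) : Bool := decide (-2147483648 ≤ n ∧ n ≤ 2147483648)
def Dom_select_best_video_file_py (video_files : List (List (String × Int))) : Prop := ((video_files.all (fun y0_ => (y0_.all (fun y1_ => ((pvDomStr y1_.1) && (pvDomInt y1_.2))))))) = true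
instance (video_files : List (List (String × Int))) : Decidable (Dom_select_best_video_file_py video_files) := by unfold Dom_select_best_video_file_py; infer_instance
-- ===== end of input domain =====

-- B replaces A's filter + fallback + stable reverse sort by a single keyed max over the
-- composite key (is-portrait, capped height); objective: simpler (one pass, no sort).

-- shared helpers: the small expressions both Pythons write inline
-- f.get(k, 0) on the association-list dict
def pvGet (f : List (String × Int)) (k : String) : Int := PySem.Dict.getD ⟨f⟩ k 0
-- f.get("height", 0) > f.get("width", 0)
def pvKP (f : List (String × Int)) : Bool := decide (pvGet f "width" < pvGet f "height")
-- min(f.get("height", 0), 1920)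
def pvKH (f : List (String × Int)) : Int := min (pvGet f "height") 1920

-- ===== PORT A =====
def select_best_video_file_py (video_files : List (List (String × Int))) : Option (List (String × Int)) :=
  let portrait_files := video_files.filter (fun f => pvKP f)
  let portrait_files := if portrait_files = [] then video_files else portrait_files
  if portrait_files = [] then none
  else
    let sorted_files := PySem.List.sorted portrait_files pvKH true
    PySem.List.pyGet? sorted_files 0

-- ===== PORT B =====
def select_best_video_file_py_alt (video_files : List (List (String × Int))) : Option (List (String × Int)) :=
  if video_files = [] then none
  else PySem.List.max2? video_files pvKP pvKH

-- ===== PRECONDITION & SPEC =====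
def Spec_select_best_video_file_py (video_files : List (List (String × Int))) (out : Option (List (String × Int))) : Prop := out = select_best_video_file_py_alt video_files
instance (video_files : List (List (String × Int))) (out : Option (List (String × Int))) : Decidable (Spec_select_best_video_file_py video_files out) := by unfold Spec_select_best_video_file_py; infer_instance

-- ===== CLAIM (what is proved, stated in full; the proofs are below) =====
def Claim_equal_select_best_video_file_py : Prop := ∀ (video_files : List (List (String × Int))), Dom_select_best_video_file_py video_files → Spec_select_best_video_file_py video_files (select_best_video_file_py video_files)

-- ===== LEMMAS AND PROOFS =====

-- the fold step of PySem.List.max? with key pvKH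
def pvStep1 (m : Option (List (String × Int))) (x : List (String × Int)) : Option (List (String × Int)) :=
  match m with
  | none => some x
  | some m => if pvKH m < pvKH x then some x else some m

-- the fold step of PySem.List.max2? with keys pvKP, pvKH
def pvStep2 (m : Option (List (String × Int))) (x : List (String × Int)) : Option (List (String × Int)) :=
  match m with
  | none => some x
  | some m => if (decide (pvKP m < pvKP x) || !decide (pvKP x < pvKP m) && decide (pvKH m < pvKH x)) then some x else some m

lemma pv_max1_eq (xs : List (List (String × Int))) :
    PySem.List.max? xs pvKH = xs.foldl pvStep1 none := by
  unfold PySem.List.max?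
  congr 1
  funext m x
  cases m <;> rfl

lemma pv_max2_eq (xs : List (List (String × Int))) :
    PySem.List.max2? xs pvKP pvKH = xs.foldl pvStep2 none := by
  unfold PySem.List.max2?
  congr 1
  funext m x
  cases m <;> rfl

lemma pv_head_insertBy (x : List (String × Int)) (acc : List (List (String × Int))) :
    (PySem.List.insertBy (fun a b => decide (pvKH b < pvKH a)) x acc).head? = pvStep1 acc.head? x := by
  cases acc with
  | nil => simp [PySem.List.insertBy, pvStep1]
  | cons y ys =>
      by_cases h : pvKH y < pvKH x <;>
        simp [PySem.List.insertBy, pvStep1, h]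

lemma pv_head_foldl_insertBy :
    ∀ (xs acc : List (List (String × Int))),
      (xs.foldl (fun acc x => PySem.List.insertBy (fun a b => decide (pvKH b < pvKH a)) x acc) acc).head?
        = xs.foldl pvStep1 acc.head? := by
  intro xs
  induction xs with
  | nil => intro acc; rfl
  | cons x xs ih =>
      intro acc
      simp only [List.foldl_cons]
      rw [ih, pv_head_insertBy]

lemma pv_head_sorted_rev (xs : List (List (String × Int))) :
    (PySem.List.sorted xs pvKH true).head? = PySem.List.max? xs pvKH := by
  rw [pv_max1_eq]
  have h := pv_head_foldl_insertBy xs []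
  simpa [PySem.List.sorted] using h

lemma pv_pyGet_zero (l : List (List (String × Int))) : PySem.List.pyGet? l 0 = l.head? := by
  cases l <;> simp [PySem.List.pyGet?, PySem.List.pyIdx?, List.head?]

-- once a portrait element is the running maximum, max2? tracks max? over the portrait filter
lemma pv_fold_portrait :
    ∀ (xs : List (List (String × Int))) (m : List (String × Int)), pvKP m = true →
      xs.foldl pvStep2 (some m) = (xs.filter pvKP).foldl pvStep1 (some m) := by
  intro xs
  induction xs with
  | nil => intro m _; rfl
  | cons x xs ih =>
      intro m hm
      by_cases hx : pvKP x = true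
      · simp only [List.foldl_cons, List.filter_cons_of_pos hx]
        have h2 : pvStep2 (some m) x = pvStep1 (some m) x := by
          simp [pvStep2, pvStep1, hm, hx]
        rw [h2]
        by_cases hlt : pvKH m < pvKH x
        · simp only [pvStep1, if_pos hlt]; exact ih x hx
        · simp only [pvStep1, if_neg hlt]; exact ih m hm
      · simp only [Bool.not_eq_true] at hx
        have hfe : (x :: xs).filter pvKP = xs.filter pvKP := by simp [hx]
        simp only [List.foldl_cons, hfe]
        have h2 : pvStep2 (some m) x = some m := by
          simp [pvStep2, hm, hx]
        rw [h2]; exact ih m hm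

-- before any portrait element is seen, the max2? accumulator is none or a non-portrait file
lemma pv_fold_mixed :
    ∀ (xs : List (List (String × Int))) (acc : Option (List (String × Int))),
      (acc = none ∨ ∃ m, acc = some m ∧ pvKP m = false) →
      xs.filter pvKP ≠ [] →
      xs.foldl pvStep2 acc = (xs.filter pvKP).foldl pvStep1 none := by
  intro xs
  induction xs with
  | nil => intro acc _ hne; simp at hne
  | cons x xs ih =>
      intro acc hacc hne
      by_cases hx : pvKP x = true
      · simp only [List.foldl_cons, List.filter_cons_of_pos hx]
        have h2 : pvStep2 acc x = some x := by
          rcases hacc with h | ⟨m, rfl, hm⟩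
          · subst h; rfl
          · simp [pvStep2, hm, hx]
        rw [h2]
        have : pvStep1 none x = some x := rfl
        rw [this]
        exact pv_fold_portrait xs x hx
      · simp only [Bool.not_eq_true] at hx
        have hfe : (x :: xs).filter pvKP = xs.filter pvKP := by simp [hx]
        rw [hfe] at hne
        simp only [List.foldl_cons, hfe]
        have hacc' : pvStep2 acc x = none ∨ ∃ m, pvStep2 acc x = some m ∧ pvKP m = false := by
          rcases hacc with h | ⟨m, rfl, hm⟩
          · subst h; exact Or.inr ⟨x, rfl, hx⟩
          · simp only [pvStep2]
            by_cases hc : (decide (pvKP m < pvKP x) || !decide (pvKP x < pvKP m) && decide (pvKH m < pvKH x)) = true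
            · rw [if_pos hc]; exact Or.inr ⟨x, rfl, hx⟩
            · rw [if_neg hc]; exact Or.inr ⟨m, rfl, hm⟩
        exact ih _ hacc' hne

-- when no file is portrait, the composite key degenerates to the capped height
lemma pv_fold_nonportrait :
    ∀ (xs : List (List (String × Int))) (acc : Option (List (String × Int))),
      (∀ f ∈ xs, pvKP f = false) →
      (acc = none ∨ ∃ m, acc = some m ∧ pvKP m = false) →
      xs.foldl pvStep2 acc = xs.foldl pvStep1 acc := by
  intro xs
  induction xs with
  | nil => intro acc _ _; rfl
  | cons x xs ih =>
      intro acc hall hacc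
      have hx : pvKP x = false := hall x (List.mem_cons_self)
      have hall' : ∀ f ∈ xs, pvKP f = false := fun f hf => hall f (List.mem_cons_of_mem _ hf)
      simp only [List.foldl_cons]
      rcases hacc with h | ⟨m, rfl, hm⟩
      · subst h
        have : pvStep2 none x = pvStep1 none x := rfl
        rw [this]
        exact ih _ hall' (Or.inr ⟨x, rfl, hx⟩)
      · have h2 : pvStep2 (some m) x = pvStep1 (some m) x := by
          simp [pvStep2, pvStep1, hm, hx]
        rw [h2]
        by_cases hlt : pvKH m < pvKH x
        · simp only [pvStep1, if_pos hlt]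
          exact ih _ hall' (Or.inr ⟨x, rfl, hx⟩)
        · simp only [pvStep1, if_neg hlt]
          exact ih _ hall' (Or.inr ⟨m, rfl, hm⟩)

-- ===== VERDICT (by name: the statement is the Claim_ definition above) =====
theorem select_best_video_file_py_spec : Claim_equal_select_best_video_file_py := by
  intro xs _
  unfold Spec_select_best_video_file_py select_best_video_file_py select_best_video_file_py_alt
  by_cases hf : xs.filter pvKP = []
  · by_cases hx : xs = []
    · subst hx; simp
    · simp only [hf, if_true, if_neg hx]
      rw [pv_pyGet_zero, pv_head_sorted_rev, pv_max1_eq, pv_max2_eq]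
      have hall : ∀ f ∈ xs, pvKP f = false := by
        intro f hfm
        by_contra hc
        simp only [Bool.not_eq_false] at hc
        have : f ∈ xs.filter pvKP := List.mem_filter.mpr ⟨hfm, hc⟩
        simp [hf] at this
      exact (pv_fold_nonportrait xs none hall (Or.inl rfl)).symm
  · have hx : xs ≠ [] := by
      intro h; subst h; simp at hf
    simp only [if_neg hf, if_neg hx]
    rw [pv_pyGet_zero, pv_head_sorted_rev, pv_max1_eq, pv_max2_eq]
    exact (pv_fold_mixed xs none (Or.inl rfl) hf).symm
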